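-- pv_equiv track=rewrite | github.com/dododoyo/Competitive-Programming | 0000CodeForces/contests/Div-4(Round918)/E_Romantic_Glasses.py | solve
-- ===== SOURCE A (Python) =====
-- def solve(n,l):
--     p = [0]
--     for i in range(n):
--         p.append(p[-1] + ((-1) ** i) * l[i])
--     ans = 'NO'
--     p.sort()
--     for i in range(n):
--         if p[i] == p[i + 1]:
--             ans = 'YES'
--             break
--     return ans
-- ===== SOURCE B (Python) =====
-- def solve(n, l):
--     seen = {0}
--     s = 0
--     for i in range(n):
--         s += l[i] if i % 2 == 0 else -l[i]
--         if s in seen: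
--             return 'YES'
--         seen.add(s)
--     return 'NO'
-- ===== Notes on version B (the rewrite author's own statement) =====
-- stated objective: faster
-- what changed: Instead of materialising all alternating-sign prefix sums, sorting them and scanning adjacent pairs, B keeps a running signed prefix sum in one pass and detects a repeat with a hash set, returning early on the first collision.
import Mathlib
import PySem

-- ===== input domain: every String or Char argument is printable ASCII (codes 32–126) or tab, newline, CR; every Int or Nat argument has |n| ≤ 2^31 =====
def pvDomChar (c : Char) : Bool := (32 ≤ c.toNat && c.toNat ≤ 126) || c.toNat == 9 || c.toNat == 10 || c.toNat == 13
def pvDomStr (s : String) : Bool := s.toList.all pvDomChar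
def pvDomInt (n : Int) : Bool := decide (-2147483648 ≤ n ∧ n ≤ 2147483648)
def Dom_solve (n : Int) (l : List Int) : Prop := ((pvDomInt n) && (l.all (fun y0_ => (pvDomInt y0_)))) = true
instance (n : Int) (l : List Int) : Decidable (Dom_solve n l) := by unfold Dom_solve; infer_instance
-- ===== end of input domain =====

-- B replaces sort-then-adjacent-scan of the alternating prefix sums by a single pass
-- with a running signed sum and a hash set, returning on the first repeated sum.

-- ===== PORT A =====
-- second loop of A, with its break: returns 'YES' on the first adjacent equal pair
def solveCheck (p : List Int) : List Int → String
  | [] => "NO"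
  | i :: rest =>
    if PySem.List.pyGetD p i 0 = PySem.List.pyGetD p (i + 1) 0 then "YES"
    else solveCheck p rest

def solve (n : Int) (l : List Int) : String :=
  -- (-1) ** i: i ranges over range(n), so i ≥ 0 and i.toNat is exact
  let p := (PySem.List.pyRange 0 n 1).foldl
    (fun p i =>
      p ++ [PySem.List.pyGetD p (-1) 0 + (-1 : Int) ^ i.toNat * PySem.List.pyGetD l i 0]) [0]
  let p := PySem.List.sorted p (fun x => x) false
  solveCheck p (PySem.List.pyRange 0 n 1)

-- ===== PORT B =====
def solveAltLoop (l : List Int) : PySem.Set Int → Int → List Int → String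
  | _, _, [] => "NO"
  | seen, s, i :: rest =>
    let s' := s + (if PySem.Int.mod i 2 = 0 then PySem.List.pyGetD l i 0
                   else - PySem.List.pyGetD l i 0)
    if PySem.Set.contains seen s' then "YES"
    else solveAltLoop l (PySem.Set.add seen s') s' rest

def solve_alt (n : Int) (l : List Int) : String :=
  solveAltLoop l (PySem.Set.ofList [0]) 0 (PySem.List.pyRange 0 n 1)

-- ===== PRECONDITION & SPEC =====
-- A raises IndexError (l[i]) when n > len(l); Pre_ excludes exactly those inputs.
def Pre_solve (n : Int) (l : List Int) : Prop := n ≤ (l.length : Int)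
instance (n : Int) (l : List Int) : Decidable (Pre_solve n l) := by unfold Pre_solve; infer_instance
def pvWitness_solve : Int × List Int := (2, [1, 1])

def Spec_solve (n : Int) (l : List Int) (out : String) : Prop := out = solve_alt n l
instance (n : Int) (l : List Int) (out : String) : Decidable (Spec_solve n l out) := by unfold Spec_solve; infer_instance

-- ===== CLAIM (what is proved, stated in full; the proofs are below) =====
def Claim_equal_solve : Prop := ∀ (n : Int) (l : List Int), Dom_solve n l → Pre_solve n l → Spec_solve n l (solve n l)

-- ===== LEMMAS AND PROOFS =====

-- the k-th signed term and the prefix sums S l k; Q l m = [S l 0, …, S l m]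
def sgn (l : List Int) (k : Nat) : Int := (-1 : Int) ^ k * l.getD k 0

def S (l : List Int) : Nat → Int
  | 0 => 0
  | k + 1 => S l k + sgn l k

def Q (l : List Int) (m : Nat) : List Int := (List.range (m + 1)).map (S l)

theorem Q_succ (l : List Int) (m : Nat) : Q l (m + 1) = Q l m ++ [S l (m + 1)] := by
  simp [Q, List.range_succ]

theorem Q_sublist (l : List Int) {m N : Nat} (h : m ≤ N) : (Q l m).Sublist (Q l N) := by
  exact List.Sublist.map _ (List.range_sublist.mpr (by omega))

-- A's first loop builds exactly Q l m
theorem foldA (l : List Int) (m : Nat) :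
    (PySem.List.pyRange 0 (m : Int) 1).foldl
      (fun p i =>
        p ++ [PySem.List.pyGetD p (-1) 0 + (-1 : Int) ^ i.toNat * PySem.List.pyGetD l i 0]) [0]
      = Q l m := by
  induction m with
  | zero => simp [Q, S]
  | succ m ih =>
    have hsplit : PySem.List.pyRange 0 ((m : Nat) + 1 : Int) 1
        = PySem.List.pyRange 0 (m : Int) 1 ++ [(m : Int)] :=
      PySem.List.pyRange_one_succ_right (by positivity)
    have : ((m + 1 : Nat) : Int) = ((m : Nat) : Int) + 1 := by push_cast; ring
    rw [this, hsplit, List.foldl_append, ih]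
    have hQ : Q l m = (List.range m).map (S l) ++ [S l m] := by
      simp [Q, List.range_succ]
    simp only [List.foldl_cons, List.foldl_nil]
    rw [Q_succ]
    congr 1
    rw [hQ, PySem.List.pyGetD_neg_one_append_singleton]
    simp [S, sgn, PySem.List.pyGetD_natCast]

-- A's second loop on a ≤-sorted p of length N+1 decides Nodup of the suffix
theorem checkA (N : Nat) (p : List Int) (hp : p.Pairwise (· ≤ ·)) (hlen : p.length = N + 1) :
    ∀ (a : Nat), a ≤ N →
      solveCheck p (PySem.List.pyRange (a : Int) (N : Int) 1)
        = if (p.drop a).Nodup then "NO" else "YES" := by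
  intro a ha
  induction hd : N - a generalizing a with
  | zero =>
    have haN : a = N := by omega
    subst haN
    rw [PySem.List.pyRange_one_eq_nil (by omega)]
    have h1 : (p.drop a).length = 1 := by simp [hlen]
    obtain ⟨x, hx⟩ := List.length_eq_one_iff.mp h1
    rw [hx]
    simp [solveCheck]
  | succ d ih =>
    have haN : a < N := by omega
    rw [PySem.List.pyRange_one_cons (by exact_mod_cast haN)]
    have ha1 : a < p.length := by omega
    have ha2 : a + 1 < p.length := by omega
    have hga : PySem.List.pyGetD p (a : Int) 0 = p[a] := by
      rw [PySem.List.pyGetD_natCast]; simp [List.getD, ha1]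
    have hga1 : PySem.List.pyGetD p ((a : Int) + 1) 0 = p[a + 1] := by
      have : ((a : Int) + 1) = ((a + 1 : Nat) : Int) := by push_cast; ring
      rw [this, PySem.List.pyGetD_natCast]; simp [List.getD, ha2]
    have hdropa : p.drop a = p[a] :: p.drop (a + 1) :=
      List.drop_eq_getElem_cons ha1
    have hdropa1 : p.drop (a + 1) = p[a + 1] :: p.drop (a + 2) :=
      List.drop_eq_getElem_cons ha2
    have hpw : (p.drop a).Pairwise (· ≤ ·) := hp.sublist (List.drop_sublist a p)
    have hle : ∀ y ∈ p.drop (a + 1), p[a] ≤ y := by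
      rw [hdropa] at hpw
      exact fun y hy => (List.pairwise_cons.mp hpw).1 y hy
    have hle1 : ∀ y ∈ p.drop (a + 2), p[a + 1] ≤ y := by
      have hpw1 : (p.drop (a + 1)).Pairwise (· ≤ ·) := hp.sublist (List.drop_sublist _ p)
      rw [hdropa1] at hpw1
      exact fun y hy => (List.pairwise_cons.mp hpw1).1 y hy
    show solveCheck p ((a : Int) :: PySem.List.pyRange ((a : Int) + 1) (N : Int) 1) = _
    rw [solveCheck, hga, hga1]
    by_cases heq : p[a] = p[a + 1]
    · rw [if_pos heq]
      have : ¬ (p.drop a).Nodup := by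
        rw [hdropa]
        intro hnd
        exact (List.nodup_cons.mp hnd).1 (by rw [hdropa1]; exact heq ▸ List.mem_cons_self)
      rw [if_neg this]
    · rw [if_neg heq]
      have hrec := ih (a + 1) (by omega) (by omega)
      have : ((a : Int) + 1) = ((a + 1 : Nat) : Int) := by push_cast; ring
      rw [this, hrec]
      have hnotmem : p[a] ∉ p.drop (a + 1) := by
        intro hmem
        rw [hdropa1] at hmem
        rcases List.mem_cons.mp hmem with h | h
        · exact heq h
        · have h1 : p[a] ≤ p[a + 1] := by
            apply hle; rw [hdropa1]; exact List.mem_cons_self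
          have h2 : p[a + 1] ≤ p[a] := hle1 _ h
          exact heq (le_antisymm h1 h2)
      have : (p.drop a).Nodup ↔ (p.drop (a + 1)).Nodup := by
        rw [hdropa, List.nodup_cons]
        constructor
        · exact fun h => h.2
        · exact fun h => ⟨hnotmem, h⟩
      by_cases hnd : (p.drop (a + 1)).Nodup
      · rw [if_pos hnd, if_pos (this.mpr hnd)]
      · rw [if_neg hnd, if_neg (fun h => hnd (this.mp h))]

-- the signed term as B computes it
theorem sgn_ite (l : List Int) (m : Nat) :
    (if PySem.Int.mod (m : Int) 2 = 0 then PySem.List.pyGetD l (m : Int) 0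
     else - PySem.List.pyGetD l (m : Int) 0) = sgn l m := by
  rw [PySem.List.pyGetD_natCast]
  have hmod : PySem.Int.mod (m : Int) 2 = ((m % 2 : Nat) : Int) := by
    exact_mod_cast PySem.Int.mod_natCast m 2
  rw [hmod, sgn]
  rcases Nat.even_or_odd m with he | ho
  · rw [if_pos (by exact_mod_cast Nat.even_iff.mp he), he.neg_one_pow]; ring
  · have h1 : m % 2 = 1 := Nat.odd_iff.mp ho
    rw [if_neg (by simp [h1]), ho.neg_one_pow]; ring

-- B's loop with seen = Q l m decides Nodup of Q l N
theorem loopB (l : List Int) (N : Nat) :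
    ∀ (m : Nat), m ≤ N → (Q l m).Nodup →
      solveAltLoop l (Q l m) (S l m) (PySem.List.pyRange (m : Int) (N : Int) 1)
        = if (Q l N).Nodup then "NO" else "YES" := by
  intro m hm hnd
  induction hd : N - m generalizing m with
  | zero =>
    have : m = N := by omega
    subst this
    rw [PySem.List.pyRange_one_eq_nil (by omega)]
    simp [solveAltLoop, hnd]
  | succ d ih =>
    have hmN : m < N := by omega
    rw [PySem.List.pyRange_one_cons (by exact_mod_cast hmN)]
    show solveAltLoop l (Q l m) (S l m)
        ((m : Int) :: PySem.List.pyRange ((m : Int) + 1) (N : Int) 1) = _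
    rw [solveAltLoop]
    simp only [sgn_ite]
    have hs' : S l m + sgn l m = S l (m + 1) := rfl
    rw [hs']
    by_cases hmem : S l (m + 1) ∈ Q l m
    · rw [if_pos (by simpa [PySem.Set.contains_iff] using hmem)]
      have : ¬ (Q l N).Nodup := by
        intro hN
        have hsub : (Q l (m + 1)).Nodup := ((Q_sublist l (by omega : m + 1 ≤ N)).nodup hN)
        rw [Q_succ] at hsub
        have := (List.nodup_append.mp hsub).2.2
        exact this _ hmem _ (by simp) rfl
      rw [if_neg this]
    · rw [if_neg (by simpa [PySem.Set.contains_iff] using hmem)]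
      have hadd : PySem.Set.add (Q l m) (S l (m + 1)) = Q l (m + 1) := by
        rw [PySem.Set.add_of_not_mem hmem, Q_succ]
      have hnd' : (Q l (m + 1)).Nodup := by
        rw [Q_succ, List.nodup_append]
        exact ⟨hnd, List.nodup_singleton _, fun a ha b hb => by
          rw [List.mem_singleton] at hb; subst hb; exact fun h => hmem (h ▸ ha)⟩
      have : ((m : Int) + 1) = ((m + 1 : Nat) : Int) := by push_cast; ring
      rw [hadd, this, ih (m + 1) (by omega) hnd' (by omega)]

-- ===== VERDICT (by name: the statement is the Claim_ definition above) =====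
theorem solve_spec : Claim_equal_solve := by
  intro n l _ hpre
  unfold Spec_solve
  by_cases hn : n < 0
  · have h1 : PySem.List.pyRange 0 n 1 = [] := PySem.List.pyRange_one_eq_nil (by omega)
    unfold solve solve_alt
    rw [h1]
    rfl
  · have hN : n = ((n.toNat : Nat) : Int) := by omega
    set N := n.toNat with hNdef
    unfold solve solve_alt
    rw [hN, foldA l N]
    have hA := checkA N (PySem.List.sorted (Q l N) (fun x => x) false)
      (by simpa using PySem.List.sorted_pairwise (Q l N) (fun x => x))
      (by simp [PySem.List.length_sorted, Q]) 0 (by omega)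
    have hperm : (PySem.List.sorted (Q l N) (fun x => x) false).Perm (Q l N) :=
      PySem.List.sorted_perm _ _ _
    have hnodup :
        (PySem.List.sorted (Q l N) (fun x => x) false).Nodup ↔ (Q l N).Nodup :=
      hperm.nodup_iff
    have hB := loopB l N 0 (by omega) (by simp [Q])
    have hQ0 : Q l 0 = PySem.Set.ofList [0] := by simp [Q]; rfl
    have hS0 : S l 0 = 0 := rfl
    rw [hQ0, hS0] at hB
    simp only [Nat.cast_zero] at hA hB
    rw [hA, hB]
    simp only [List.drop_zero]
    by_cases hnd : (Q l N).Nodup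
    · rw [if_pos (hnodup.mpr hnd), if_pos hnd]
    · rw [if_neg (fun h => hnd (hnodup.mp h)), if_neg hnd]
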